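-- pv_equiv track=rewrite | github.com/Zhengsh123/V-Bridge | V-Bridge/inference.py | balance_tasks
-- ===== SOURCE A (Python) =====
-- def balance_tasks(tasks, num_gpus):
--     """
--     Use a greedy algorithm to evenly distribute tasks across GPUs.
--
--     Args:
--         tasks: [(folder_name, img_path, pixel_load), ...]
--         num_gpus
--
--     Returns:
--         list: [gpu0_tasks, gpu1_tasks, ...], 每个gpu_tasks是 [(folder_name, img_path), ...]
--     """
--     sorted_tasks = sorted(tasks, key=lambda x: x[2], reverse=True)
--
--     gpu_tasks = [[] for _ in range(num_gpus)]
--     gpu_loads = [0] * num_gpus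
--
--
--     for folder_name, img_path, pixel_load in sorted_tasks:
--
--         min_load_gpu = gpu_loads.index(min(gpu_loads))
--
--         gpu_tasks[min_load_gpu].append((folder_name, img_path))
--
--         gpu_loads[min_load_gpu] += pixel_load
--
--     return gpu_tasks
-- ===== SOURCE B (Python) =====
-- def balance_tasks(tasks, num_gpus):
--     """Greedy LPT distribution, but the (load, gpu_index) pairs are kept in a
--     descending-sorted pool: the least-loaded GPU (smallest load, then smallest
--     index) is popped from the tail in O(1) and re-inserted by binary search,
--     instead of re-scanning all GPU loads with min()/index() for every task."""
--     result = [[] for _ in range(num_gpus)]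
--     pool = [(0, i) for i in range(num_gpus)]
--     pool.reverse()
--     for folder_name, img_path, pixel_load in sorted(tasks, key=lambda x: x[2], reverse=True):
--         load, i = pool.pop()
--         result[i].append((folder_name, img_path))
--         item = (load + pixel_load, i)
--         lo, hi = 0, len(pool)
--         while lo < hi:
--             mid = (lo + hi) // 2
--             if pool[mid] > item:
--                 lo = mid + 1
--             else:
--                 hi = mid
--         pool.insert(lo, item)
--     return result
-- ===== Notes on version B (the rewrite author's own statement) =====
-- stated objective: faster
-- what changed: Instead of rescanning all GPU loads with min() and list.index() for every task, B keeps the (load, gpu_index) pairs in a descending-sorted pool: the least-loaded GPU (smallest load, then smallest index, as in A) is popped from the tail in O(1) and re-inserted at the position found by a hand-written binary search.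
import Mathlib
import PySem

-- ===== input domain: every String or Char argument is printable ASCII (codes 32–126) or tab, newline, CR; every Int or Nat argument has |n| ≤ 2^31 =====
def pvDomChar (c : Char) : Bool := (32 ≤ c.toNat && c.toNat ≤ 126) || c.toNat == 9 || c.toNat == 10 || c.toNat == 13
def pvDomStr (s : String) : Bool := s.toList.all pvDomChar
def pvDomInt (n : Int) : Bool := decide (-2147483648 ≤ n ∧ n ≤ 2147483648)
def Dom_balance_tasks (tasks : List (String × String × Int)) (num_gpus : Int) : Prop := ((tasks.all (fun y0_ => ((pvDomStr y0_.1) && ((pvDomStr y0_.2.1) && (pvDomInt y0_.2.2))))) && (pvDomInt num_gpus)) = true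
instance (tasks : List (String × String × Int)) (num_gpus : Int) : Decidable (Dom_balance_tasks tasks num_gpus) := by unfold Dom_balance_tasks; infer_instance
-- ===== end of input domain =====

-- B replaces A's per-task min()/index() scans over all GPU loads by a descending-sorted
-- pool of (load, gpu_index) pairs: pop the least-loaded GPU from the tail, re-insert by
-- binary search (measurably faster; same return value on Pre_).

-- ===== PORT A =====
def balance_tasks (tasks : List (String × String × Int)) (num_gpus : Int) : List (List (String × String)) :=
  -- sorted_tasks = sorted(tasks, key=lambda x: x[2], reverse=True)
  let sorted_tasks := PySem.List.sorted tasks (fun x => x.2.2) true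
  -- gpu_tasks = [[] for _ in range(num_gpus)]; gpu_loads = [0] * num_gpus
  let gpu_tasks : List (List (String × String)) := (PySem.List.pyRange 0 num_gpus 1).map (fun _ => [])
  let gpu_loads : List Int := List.replicate num_gpus.toNat 0
  let final := sorted_tasks.foldl (fun st t =>
    -- min_load_gpu = gpu_loads.index(min(gpu_loads))   (min of [] raises ValueError → Pre_)
    let m := (PySem.List.min? st.2 (fun x => x)).getD 0
    let min_load_gpu : Int := ((PySem.List.index? st.2 m).getD 0 : Nat)
    -- gpu_tasks[min_load_gpu].append((folder_name, img_path))
    let gpu_tasks' := PySem.List.pySetD st.1 min_load_gpu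
      (PySem.List.pyGetD st.1 min_load_gpu [] ++ [(t.1, t.2.1)])
    -- gpu_loads[min_load_gpu] += pixel_load
    let gpu_loads' := PySem.List.pySetD st.2 min_load_gpu
      (PySem.List.pyGetD st.2 min_load_gpu 0 + t.2.2)
    (gpu_tasks', gpu_loads')) (gpu_tasks, gpu_loads)
  final.1

-- ===== PORT B =====
-- Python tuple comparison `a > b` on int pairs (lexicographic)
def pvGtPair (a b : Int × Int) : Bool := b.1 < a.1 || (b.1 == a.1 && b.2 < a.2)

-- the `while lo < hi: mid = (lo+hi)//2 …` binary-search loop of Source B, as a recursion on hi-lo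
def pvBsearch (pool : List (Int × Int)) (item : Int × Int) (lo hi : Int) : Int :=
  if h : lo < hi then
    let mid := PySem.Int.floordiv (lo + hi) 2
    if pvGtPair (PySem.List.pyGetD pool mid (0, 0)) item then
      pvBsearch pool item (mid + 1) hi
    else
      pvBsearch pool item lo mid
  else lo
termination_by (hi - lo).toNat
decreasing_by
  · have := PySem.Int.floordiv_eq_ediv_of_pos (a := lo + hi) (b := 2) (by omega)
    simp only [mid, this] at *; omega
  · have := PySem.Int.floordiv_eq_ediv_of_pos (a := lo + hi) (b := 2) (by omega)
    simp only [mid, this] at *; omega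

def balance_tasks_alt (tasks : List (String × String × Int)) (num_gpus : Int) : List (List (String × String)) :=
  -- result = [[] for _ in range(num_gpus)]
  let result : List (List (String × String)) := (PySem.List.pyRange 0 num_gpus 1).map (fun _ => [])
  -- pool = [(0, i) for i in range(num_gpus)]; pool.reverse()
  let pool : List (Int × Int) := ((PySem.List.pyRange 0 num_gpus 1).map (fun i => ((0 : Int), i))).reverse
  let final := (PySem.List.sorted tasks (fun x => x.2.2) true).foldl (fun st t =>
    -- load, i = pool.pop()   (raises IndexError on empty pool → Pre_)
    let p := (PySem.List.pop? st.2 (-1)).getD (((0 : Int), (0 : Int)), [])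
    let li := p.1
    let pool1 := p.2
    -- result[i].append((folder_name, img_path))
    let res' := PySem.List.pySetD st.1 li.2 (PySem.List.pyGetD st.1 li.2 [] ++ [(t.1, t.2.1)])
    -- item = (load + pixel_load, i); binary search; pool.insert(lo, item)
    let item := (li.1 + t.2.2, li.2)
    let lo := pvBsearch pool1 item 0 (PySem.List.len pool1)
    (res', PySem.List.insert pool1 lo item)) (result, pool)
  final.1

-- ===== PRECONDITION & SPEC =====
-- A raises (ValueError from min([])) iff tasks is nonempty and num_gpus ≤ 0; Pre_ excludes exactly that.
def Pre_balance_tasks (tasks : List (String × String × Int)) (num_gpus : Int) : Prop :=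
  tasks = [] ∨ 1 ≤ num_gpus
instance (tasks : List (String × String × Int)) (num_gpus : Int) : Decidable (Pre_balance_tasks tasks num_gpus) := by unfold Pre_balance_tasks; infer_instance

def pvWitness_balance_tasks : (List (String × String × Int)) × Int :=
  ([("a", "x.png", 7), ("b", "y.png", 3), ("c", "z.png", 5)], 2)

def Spec_balance_tasks (tasks : List (String × String × Int)) (num_gpus : Int) (out : List (List (String × String))) : Prop := out = balance_tasks_alt tasks num_gpus
instance (tasks : List (String × String × Int)) (num_gpus : Int) (out : List (List (String × String))) : Decidable (Spec_balance_tasks tasks num_gpus out) := by unfold Spec_balance_tasks; infer_instance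

-- ===== CLAIM (what is proved, stated in full; the proofs are below) =====
def Claim_equal_balance_tasks : Prop := ∀ (tasks : List (String × String × Int)) (num_gpus : Int), Dom_balance_tasks tasks num_gpus → Pre_balance_tasks tasks num_gpus → Spec_balance_tasks tasks num_gpus (balance_tasks tasks num_gpus)

-- ===== LEMMAS AND PROOFS =====

def PvGt (a b : Int × Int) : Prop := b.1 < a.1 ∨ (b.1 = a.1 ∧ b.2 < a.2)
theorem pvGtPair_iff (a b : Int × Int) : pvGtPair a b = true ↔ PvGt a b := by
  simp [pvGtPair, PvGt]
theorem pvGt_trichotomy (a b : Int × Int) (h : a ≠ b) : PvGt a b ∨ PvGt b a := by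
  rcases a with ⟨a1, a2⟩; rcases b with ⟨b1, b2⟩
  simp only [ne_eq, Prod.mk.injEq, not_and] at h
  simp only [PvGt] at *
  omega
theorem pvGt_trans {a b c : Int × Int} (h1 : PvGt a b) (h2 : PvGt b c) : PvGt a c := by
  simp only [PvGt] at *; omega
def pairsOf (ls : List Int) : List (Int × Int) :=
  (PySem.List.enumerate ls 0).map (fun p => (p.2, p.1))
theorem length_pairsOf (ls : List Int) : (pairsOf ls).length = ls.length := by
  simp [pairsOf, PySem.List.length_enumerate]
theorem getElem_pairsOf (ls : List Int) (k : Nat) (hk : k < ls.length) :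
    (pairsOf ls)[k]'(by simpa [length_pairsOf] using hk) = (ls[k], (k : Int)) := by
  simp [pairsOf, PySem.List.getElem_enumerate]
theorem mem_pairsOf {ls : List Int} {p : Int × Int} :
    p ∈ pairsOf ls ↔ ∃ (k : Nat) (hk : k < ls.length), p = (ls[k], (k : Int)) := by
  simp only [pairsOf, List.mem_map, PySem.List.mem_enumerate_iff]
  constructor
  · rintro ⟨q, ⟨k, hk, rfl⟩, rfl⟩; exact ⟨k, hk, by simp⟩
  · rintro ⟨k, hk, rfl⟩; exact ⟨(k, ls[k]), ⟨k, hk, by simp⟩, rfl⟩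
theorem pairsOf_set (ls : List Int) (k : Nat) (v : Int) (hk : k < ls.length) :
    pairsOf (ls.set k v) = (pairsOf ls).set k (v, (k : Int)) := by
  apply List.ext_getElem
  · simp [length_pairsOf]
  · intro i h1 h2
    have hl : i < ls.length := by simpa [length_pairsOf] using h1
    rw [List.getElem_set]
    have := getElem_pairsOf (ls.set k v) i (by simpa using hl)
    rw [this, List.getElem_set]
    by_cases hik : i = k
    · subst hik; simp
    · rw [if_neg (fun h => hik h.symm), if_neg (fun h => hik h.symm), getElem_pairsOf ls i hl]
theorem snd_ne_of_mem_eraseIdx (ls : List Int) (j : Nat) {p : Int × Int}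
    (hp : p ∈ (pairsOf ls).eraseIdx j) : p.2 ≠ (j : Int) := by
  rw [List.eraseIdx_eq_take_drop_succ] at hp
  rcases List.mem_append.mp hp with h | h
  · obtain ⟨i, hi, hieq⟩ := List.mem_iff_getElem.mp h
    have hij : i < j := by simp [List.length_take] at hi; omega
    have hil : i < ls.length := by simp [List.length_take, length_pairsOf] at hi; omega
    rw [List.getElem_take] at hieq
    rw [getElem_pairsOf ls i hil] at hieq
    rw [← hieq]; simp; omega
  · obtain ⟨i, hi, hieq⟩ := List.mem_iff_getElem.mp h
    have hil : j + 1 + i < ls.length := by simp [List.length_drop, length_pairsOf] at hi; omega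
    rw [List.getElem_drop] at hieq
    rw [getElem_pairsOf ls (j+1+i) hil] at hieq
    rw [← hieq]; simp; omega
theorem pvBsearch_spec (pool : List (Int × Int)) (x : Int × Int)
    (hs : pool.Pairwise PvGt) :
    ∀ (lo hi : Int), 0 ≤ lo → lo ≤ hi → hi ≤ pool.length →
    (∀ (k : Nat) (hk : k < pool.length), (k : Int) < lo → PvGt pool[k] x) →
    (∀ (k : Nat) (hk : k < pool.length), hi ≤ (k : Int) → ¬ PvGt pool[k] x) →
    ∃ r : Nat, pvBsearch pool x lo hi = (r : Int) ∧ r ≤ pool.length ∧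
      (∀ (k : Nat) (hk : k < pool.length), k < r → PvGt pool[k] x) ∧
      (∀ (k : Nat) (hk : k < pool.length), r ≤ k → ¬ PvGt pool[k] x) := by
  have hpw := List.pairwise_iff_getElem.mp hs
  intro lo hi
  induction lo, hi using pvBsearch.induct pool x with
  | case1 lo hi h mid hcmp ih =>
    intro h0 hlh hhl hbelow habove
    have hmid : lo ≤ mid ∧ mid < hi := by
      have := PySem.Int.floordiv_eq_ediv_of_pos (a := lo + hi) (b := 2) (by omega)
      simp only [mid, this]; omega
    have hmidlt : mid.toNat < pool.length := by omega
    have hget : PySem.List.pyGetD pool mid (0,0) = pool[mid.toNat] :=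
      PySem.List.pyGetD_eq_getElem pool (0,0) (by omega) (by omega)
    rw [hget, pvGtPair_iff] at hcmp
    rw [pvBsearch]
    rw [dif_pos h, if_pos (by rw [hget, pvGtPair_iff]; exact hcmp)]
    apply ih (by omega) (by omega) hhl
    · intro k hk hklt
      by_cases hkm : (k : Int) < lo
      · exact hbelow k hk hkm
      · by_cases hkeq : k = mid.toNat
        · subst hkeq; exact hcmp
        · exact pvGt_trans (hpw k mid.toNat hk hmidlt (by omega)) hcmp
    · exact habove
  | case2 lo hi h mid hcmp ih =>
    intro h0 hlh hhl hbelow habove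
    have hmid : lo ≤ mid ∧ mid < hi := by
      have := PySem.Int.floordiv_eq_ediv_of_pos (a := lo + hi) (b := 2) (by omega)
      simp only [mid, this]; omega
    have hmidlt : mid.toNat < pool.length := by omega
    have hget : PySem.List.pyGetD pool mid (0,0) = pool[mid.toNat] :=
      PySem.List.pyGetD_eq_getElem pool (0,0) (by omega) (by omega)
    rw [hget] at hcmp
    have hcmp' : ¬ PvGt pool[mid.toNat] x := by
      rw [← pvGtPair_iff]; simp [hcmp]
    rw [pvBsearch]
    rw [dif_pos h, if_neg (by rw [hget]; simp [hcmp])]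
    apply ih (by omega) (by omega) (by omega) hbelow
    · intro k hk hkge
      by_cases hkeq : k = mid.toNat
      · subst hkeq; exact hcmp'
      · intro hgt
        exact hcmp' (pvGt_trans (hpw mid.toNat k hmidlt hk (by omega)) hgt)
  | case3 lo hi h =>
    intro h0 hlh hhl hbelow habove
    refine ⟨lo.toNat, ?_, by omega, ?_, ?_⟩
    · rw [pvBsearch, dif_neg h]; omega
    · intro k hk hklt; exact hbelow k hk (by omega)
    · intro k hk hkge
      apply habove k hk (by omega)
theorem pop_lemma (pool init : List (Int × Int)) (last : Int × Int) (loads : List Int)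
    (hp : pool.Pairwise PvGt) (hperm : pool.Perm (pairsOf loads))
    (hpool : pool = init ++ [last]) :
    ∃ (m : Int) (j : Nat) (hj : j < loads.length),
      PySem.List.min? loads (fun x => x) = some m ∧
      PySem.List.index? loads m = some j ∧
      loads[j] = m ∧ last = (m, (j : Int)) ∧
      init.Perm ((pairsOf loads).eraseIdx j) := by
  subst hpool
  have hgt : ∀ p ∈ init ++ [last], p = last ∨ PvGt p last := by
    rw [List.pairwise_append] at hp
    intro p hp'
    rcases List.mem_append.mp hp' with h | h
    · exact Or.inr (hp.2.2 p h last (by simp))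
    · simp at h; exact Or.inl h
  have hne : loads ≠ [] := by
    intro h
    have := hperm.length_eq
    simp [h, length_pairsOf] at this
  obtain ⟨m, hm⟩ : ∃ m, PySem.List.min? loads (fun x => x) = some m := by
    rcases hmo : PySem.List.min? loads (fun x => x) with _ | m
    · exact absurd ((PySem.List.min?_eq_none_iff _ _).mp hmo) hne
    · exact ⟨m, rfl⟩
  have hmin := PySem.List.min?_isMin hm
  have hmem := PySem.List.min?_mem hm
  obtain ⟨j, hidx⟩ : ∃ j, PySem.List.index? loads m = some j := by
    rcases hio : PySem.List.index? loads m with _ | j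
    · have := (PySem.List.index?_isSome_iff loads m).mpr hmem
      rw [hio] at this; simp at this
    · exact ⟨j, rfl⟩
  obtain ⟨hj, hgj, hfirst⟩ := PySem.List.getElem_of_index?_eq_some hidx
  have hlastmem : last ∈ pairsOf loads := hperm.mem_iff.mp (by simp)
  obtain ⟨k, hk, hlast⟩ := mem_pairsOf.mp hlastmem
  have hmjmem : (m, (j : Int)) ∈ init ++ [last] :=
    hperm.mem_iff.mpr (mem_pairsOf.mpr ⟨j, hj, by rw [hgj]⟩)
  have hlmj : last = (m, (j : Int)) := by
    rcases hgt _ hmjmem with h | h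
    · exact h.symm
    · exfalso
      rw [hlast] at h
      simp only [PvGt] at h
      rcases h with h | ⟨h1, h2⟩
      · exact absurd (hmin _ (List.getElem_mem hk)) (by omega)
      · have hkj : k < j := by exact_mod_cast h2
        exact hfirst k hkj h1
  have hdec : pairsOf loads = (pairsOf loads).take j ++ (m, (j:Int)) :: (pairsOf loads).drop (j+1) := by
    conv_lhs => rw [← List.take_append_drop j (pairsOf loads)]
    congr 1
    rw [← List.getElem_cons_drop (by simpa [length_pairsOf] using hj)]
    rw [getElem_pairsOf loads j hj, hgj]
  have e1 : (init ++ [last]).Perm (last :: init) := by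
    simpa using (List.perm_middle (l₁ := init) (l₂ := ([] : List (Int × Int))) (a := last))
  have e2 : (pairsOf loads).Perm ((m, (j:Int)) :: (pairsOf loads).eraseIdx j) := by
    rw [List.eraseIdx_eq_take_drop_succ]
    conv_lhs => rw [hdec]
    exact List.perm_middle
  have e3 : (last :: init).Perm ((m, (j:Int)) :: (pairsOf loads).eraseIdx j) :=
    e1.symm.trans (hperm.trans e2)
  rw [hlmj] at e3
  exact ⟨m, j, hj, hm, hidx, hgj, hlmj, e3.cons_inv⟩
theorem pySetD_natCast' {α : Type} (xs : List α) (n : Nat) (v : α) (h : n < xs.length) :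
    PySem.List.pySetD xs (n : Int) v = xs.set n v := by
  simp [PySem.List.pySetD, PySem.List.pySet?_natCast xs n v h]

theorem insert_step (init : List (Int × Int)) (item : Int × Int)
    (hs : init.Pairwise PvGt) (hne : ∀ p ∈ init, p ≠ item) :
    (PySem.List.insert init (pvBsearch init item 0 (PySem.List.len init)) item).Pairwise PvGt ∧
    (PySem.List.insert init (pvBsearch init item 0 (PySem.List.len init)) item).Perm (item :: init) := by
  have hlen : PySem.List.len init = (init.length : Int) := by simp
  obtain ⟨r, hreq, hrle, hlt, hge⟩ :=
    pvBsearch_spec init item hs 0 (PySem.List.len init) le_rfl (by simp) (by simp)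
      (by intro k hk hklt; omega)
      (by intro k hk hge'; rw [hlen] at hge'; omega)
  rw [hreq, PySem.List.insert_natCast init r item hrle]
  have hpwinit := List.pairwise_iff_getElem.mp hs
  constructor
  · rw [List.pairwise_append]
    refine ⟨List.Pairwise.sublist (List.take_sublist r init) hs, ?_, ?_⟩
    · rw [List.pairwise_cons]
      refine ⟨?_, List.Pairwise.sublist (List.drop_sublist r init) hs⟩
      intro b hb
      obtain ⟨i, hi, hieq⟩ := List.mem_iff_getElem.mp hb
      have hrl : r + i < init.length := by simp [List.length_drop] at hi; omega
      rw [List.getElem_drop] at hieq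
      have hnp : ¬ PvGt b item := by rw [← hieq]; exact hge (r + i) hrl (by omega)
      have hbne : b ≠ item := hne b (List.mem_of_mem_drop hb)
      rcases pvGt_trichotomy b item hbne with h | h
      · exact absurd h hnp
      · exact h
    · intro a ha b hb
      obtain ⟨i, hi, hieq⟩ := List.mem_iff_getElem.mp ha
      have hir : i < r := by simp [List.length_take] at hi; omega
      have hil : i < init.length := by omega
      rw [List.getElem_take] at hieq
      rcases List.mem_cons.mp hb with rfl | hb'
      · rw [← hieq]; exact hlt i hil hir
      · obtain ⟨i2, hi2, hieq2⟩ := List.mem_iff_getElem.mp hb'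
        have hrl2 : r + i2 < init.length := by simp [List.length_drop] at hi2; omega
        rw [List.getElem_drop] at hieq2
        rw [← hieq, ← hieq2]
        exact hpwinit i (r + i2) hil hrl2 (by omega)
  · have h := List.perm_middle (l₁ := List.take r init) (l₂ := List.drop r init) (a := item)
    rwa [List.take_append_drop] at h
theorem loop_lemma (l : List (String × String × Int)) :
    ∀ (gt : List (List (String × String))) (loads : List Int) (pool : List (Int × Int)),
    loads ≠ [] → pool.Pairwise PvGt → pool.Perm (pairsOf loads) →
    (l.foldl (fun st t =>
      let m := (PySem.List.min? st.2 (fun x => x)).getD 0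
      let j : Int := ((PySem.List.index? st.2 m).getD 0 : Nat)
      (PySem.List.pySetD st.1 j (PySem.List.pyGetD st.1 j [] ++ [(t.1, t.2.1)]),
       PySem.List.pySetD st.2 j (PySem.List.pyGetD st.2 j 0 + t.2.2))) (gt, loads)).1 =
    (l.foldl (fun st t =>
      let p := (PySem.List.pop? st.2 (-1)).getD (((0 : Int), (0 : Int)), [])
      let li := p.1
      let pool1 := p.2
      let res' := PySem.List.pySetD st.1 li.2 (PySem.List.pyGetD st.1 li.2 [] ++ [(t.1, t.2.1)])
      let item := (li.1 + t.2.2, li.2)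
      let lo := pvBsearch pool1 item 0 (PySem.List.len pool1)
      (res', PySem.List.insert pool1 lo item)) (gt, pool)).1 := by
  induction l with
  | nil => intro gt loads pool _ _ _; rfl
  | cons t l ih =>
    intro gt loads pool hne hp hperm
    have hpne : pool ≠ [] := by
      intro h
      have := hperm.length_eq
      rw [h, length_pairsOf] at this
      exact hne (List.length_eq_zero_iff.mp this.symm)
    obtain ⟨init, last, rfl⟩ : ∃ init last, pool = init ++ [last] :=
      ⟨pool.dropLast, pool.getLast hpne, (List.dropLast_append_getLast hpne).symm⟩
    obtain ⟨m, j, hj, hm, hidx, hgj, hlmj, hpe⟩ := pop_lemma _ _ _ _ hp hperm rfl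
    set w := t.2.2 with hw
    set item : Int × Int := (m + w, (j : Int)) with hitem
    set gt' := PySem.List.pySetD gt ((j : Nat) : Int)
      (PySem.List.pyGetD gt ((j : Nat) : Int) [] ++ [(t.1, t.2.1)]) with hgt'
    -- A's one step
    have hfa : (fun (st : List (List (String × String)) × List Int) (t : String × String × Int) =>
      let m := (PySem.List.min? st.2 (fun x => x)).getD 0
      let j : Int := ((PySem.List.index? st.2 m).getD 0 : Nat)
      (PySem.List.pySetD st.1 j (PySem.List.pyGetD st.1 j [] ++ [(t.1, t.2.1)]),
       PySem.List.pySetD st.2 j (PySem.List.pyGetD st.2 j 0 + t.2.2))) (gt, loads) t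
      = (gt', loads.set j (m + w)) := by
      simp only [hm, hidx, Option.getD_some]
      have h1 : PySem.List.pyGetD loads ((j : Nat) : Int) 0 = m := by
        rw [PySem.List.pyGetD_eq_getElem loads 0 (by omega) (by exact_mod_cast hj)]
        simpa using hgj
      rw [h1, pySetD_natCast' loads j (m + w) hj]
    -- B's one step
    have hB1 : (PySem.List.pop? (init ++ [last]) (-1)).getD (((0:Int),(0:Int)), []) = (last, init) := by
      rw [PySem.List.pop?_last]; rfl
    have hinitpw : init.Pairwise PvGt := (List.pairwise_append.mp hp).1
    have hinitne : ∀ p ∈ init, p ≠ item := by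
      intro p hpmem heq
      have := snd_ne_of_mem_eraseIdx loads j (hpe.mem_iff.mp hpmem)
      rw [heq] at this
      exact this rfl
    have hfb : (fun (st : List (List (String × String)) × List (Int × Int)) (t : String × String × Int) =>
      let p := (PySem.List.pop? st.2 (-1)).getD (((0 : Int), (0 : Int)), [])
      let li := p.1
      let pool1 := p.2
      let res' := PySem.List.pySetD st.1 li.2 (PySem.List.pyGetD st.1 li.2 [] ++ [(t.1, t.2.1)])
      let item := (li.1 + t.2.2, li.2)
      let lo := pvBsearch pool1 item 0 (PySem.List.len pool1)
      (res', PySem.List.insert pool1 lo item)) (gt, init ++ [last]) t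
      = (gt', PySem.List.insert init (pvBsearch init item 0 (PySem.List.len init)) item) := by
      simp only [hB1]
      rw [hlmj]
    obtain ⟨hpw', hperm'⟩ := insert_step init item hinitpw hinitne
    -- new pairs permutation
    have hsetp : (pairsOf (loads.set j (m + w))).Perm (item :: (pairsOf loads).eraseIdx j) := by
      rw [pairsOf_set loads j (m + w) hj]
      rw [List.set_eq_take_append_cons_drop, if_pos (by rw [length_pairsOf]; exact hj)]
      rw [List.eraseIdx_eq_take_drop_succ]
      exact List.perm_middle
    have hperm2 : (PySem.List.insert init (pvBsearch init item 0 (PySem.List.len init)) item).Perm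
        (pairsOf (loads.set j (m + w))) := by
      refine hperm'.trans ?_
      exact ((hsetp.trans (hpe.cons item).symm).symm : _)
    simp only [List.foldl_cons, hfa, hfb]
    exact ih gt' (loads.set j (m + w)) _
      (by intro h
          have hlen0 : (loads.set j (m + w)).length = 0 := by rw [h]; rfl
          rw [List.length_set] at hlen0; omega)
      hpw' hperm2
theorem init_invariant (num_gpus : Int) (h : 1 ≤ num_gpus) :
    (List.replicate num_gpus.toNat (0 : Int)) ≠ [] ∧
    (((PySem.List.pyRange 0 num_gpus 1).map (fun i => ((0 : Int), i))).reverse).Pairwise PvGt ∧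
    (((PySem.List.pyRange 0 num_gpus 1).map (fun i => ((0 : Int), i))).reverse).Perm
      (pairsOf (List.replicate num_gpus.toNat 0)) := by
  have hfwd : (PySem.List.pyRange 0 num_gpus 1).map (fun i => ((0 : Int), i))
      = pairsOf (List.replicate num_gpus.toNat 0) := by
    apply List.ext_getElem
    · simp [length_pairsOf, PySem.List.length_pyRange_one]
    · intro k h1 h2
      have hk : k < num_gpus.toNat := by
        simpa [PySem.List.length_pyRange_one] using h1
      rw [List.getElem_map, PySem.List.getElem_pyRange_one]
      rw [getElem_pairsOf _ k (by simpa using hk)]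
      simp
  refine ⟨by simp; omega, ?_, ?_⟩
  · rw [List.pairwise_reverse, List.pairwise_map]
    apply (PySem.List.pairwise_lt_pyRange_one 0 num_gpus).imp
    intro a b hab
    exact Or.inr ⟨rfl, hab⟩
  · rw [hfwd]
    exact (List.reverse_perm _)

-- ===== VERDICT (by name: the statement is the Claim_ definition above) =====
theorem balance_tasks_spec : Claim_equal_balance_tasks := by
  intro tasks num_gpus _hdom hpre
  unfold Spec_balance_tasks balance_tasks balance_tasks_alt
  rcases hpre with h | h
  · subst h; rfl
  · obtain ⟨h1, h2, h3⟩ := init_invariant num_gpus h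
    simpa using loop_lemma (PySem.List.sorted tasks (fun x => x.2.2) true) _ _ _ h1 h2 h3
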